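-- pv_equiv track=rewrite | github.com/holbizmetrics/prime-alphabet-finder | prime_encoder_extended.py | esperanto_number_word
-- ===== SOURCE A (Python) =====
-- def esperanto_number_word(n: int) -> str:
--     """Esperanto number words."""
--     if n == 0: return "nul"
--     ones = ["", "unu", "du", "tri", "kvar", "kvin", "ses", "sep", "ok", "nau"]
--     if n < 10: return ones[n]
--     elif n < 100:
--         if n < 20:
--             return "dek" + (" " + ones[n % 10] if n % 10 else "")
--         if n % 10 == 0:
--             return ones[n // 10] + "dek"
--         return ones[n // 10] + "dek " + ones[n % 10]
--     elif n < 1000: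
--         if n // 100 == 1: prefix = "cent"
--         else: prefix = ones[n // 100] + "cent"
--         return prefix + (" " + esperanto_number_word(n % 100) if n % 100 else "")
--     return str(n)
-- ===== SOURCE B (Python) =====
-- def esperanto_number_word(n: int) -> str:
--     """Esperanto number words, assembled positionally (no recursion)."""
--     if n == 0:
--         return "nul"
--     ones = ["", "unu", "du", "tri", "kvar", "kvin", "ses", "sep", "ok", "nau"]
--     if n < 10:
--         return ones[n]
--     if n >= 1000:
--         return str(n)
--     h, rem = divmod(n, 100)
--     t, o = divmod(rem, 10)
--     parts = []
--     if h:
--         parts.append("cent" if h == 1 else ones[h] + "cent")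
--     if rem:
--         if t == 0:
--             parts.append(ones[rem])
--         else:
--             parts.append("dek" if t == 1 else ones[t] + "dek")
--             if o:
--                 parts.append(ones[o])
--     return " ".join(parts)
-- ===== Notes on version B (the rewrite author's own statement) =====
-- stated objective: alternative
-- what changed: Replaced A's recursive tens/hundreds branches with a single flat block that splits each two/three-digit number into hundreds/tens/ones digits via divmod and joins a parts list, eliminating the recursion.
-- outside the precondition, e.g. on esperanto_number_word(-11): A raises IndexError, B raises IndexError
import Mathlib
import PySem

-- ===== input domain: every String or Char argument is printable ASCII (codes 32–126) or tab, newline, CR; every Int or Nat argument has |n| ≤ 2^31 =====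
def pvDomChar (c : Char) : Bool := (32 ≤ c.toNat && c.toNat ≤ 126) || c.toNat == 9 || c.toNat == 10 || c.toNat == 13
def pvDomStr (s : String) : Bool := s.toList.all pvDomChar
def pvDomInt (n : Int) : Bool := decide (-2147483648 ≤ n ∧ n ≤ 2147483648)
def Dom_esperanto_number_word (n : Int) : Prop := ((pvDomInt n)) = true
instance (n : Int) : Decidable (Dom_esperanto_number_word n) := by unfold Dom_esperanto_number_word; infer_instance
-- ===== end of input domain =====

-- B replaces A's recursive hundreds branch with a flat positional digit assembly joined from a parts list (objective: alternative decomposition, same cost).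

-- ===== PORT A =====
def onesA : List String := ["", "unu", "du", "tri", "kvar", "kvin", "ses", "sep", "ok", "nau"]

def esperanto_number_word (n : Int) : String :=
  if n = 0 then "nul"
  else if n < 10 then (PySem.List.pyGet? onesA n).getD ""   -- IndexError (none) excluded by Pre_
  else if n < 100 then
    if n < 20 then
      "dek" ++ (if PySem.Int.mod n 10 ≠ 0 then " " ++ (PySem.List.pyGet? onesA (PySem.Int.mod n 10)).getD "" else "")
    else if PySem.Int.mod n 10 = 0 then
      (PySem.List.pyGet? onesA (PySem.Int.floordiv n 10)).getD "" ++ "dek"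
    else
      (PySem.List.pyGet? onesA (PySem.Int.floordiv n 10)).getD "" ++ "dek " ++ (PySem.List.pyGet? onesA (PySem.Int.mod n 10)).getD ""
  else if n < 1000 then
    let pfx := if PySem.Int.floordiv n 100 = 1 then "cent"
               else (PySem.List.pyGet? onesA (PySem.Int.floordiv n 100)).getD "" ++ "cent"
    pfx ++ (if PySem.Int.mod n 100 ≠ 0 then " " ++ esperanto_number_word (PySem.Int.mod n 100) else "")
  else PySem.Int.toStr n
termination_by n.toNat
decreasing_by
  have h1 : PySem.Int.mod n 100 = n % 100 := PySem.Int.mod_eq_emod_of_pos (by omega)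
  rw [h1]
  omega

-- ===== PORT B =====
-- (B uses the same constant word table onesA)
def esperanto_number_word_alt (n : Int) : String :=
  if n = 0 then "nul"
  else if n < 10 then (PySem.List.pyGet? onesA n).getD ""   -- IndexError (none) excluded by Pre_
  else if n ≥ 1000 then PySem.Int.toStr n
  else
    let h := PySem.Int.floordiv n 100
    let rem := PySem.Int.mod n 100
    let t := PySem.Int.floordiv rem 10
    let o := PySem.Int.mod rem 10
    let parts : List String :=
      if h ≠ 0 then [if h = 1 then "cent" else (PySem.List.pyGet? onesA h).getD "" ++ "cent"] else []
    let parts : List String :=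
      if rem ≠ 0 then
        if t = 0 then parts ++ [(PySem.List.pyGet? onesA rem).getD ""]
        else parts ++ [if t = 1 then "dek" else (PySem.List.pyGet? onesA t).getD "" ++ "dek"]
                   ++ (if o ≠ 0 then [(PySem.List.pyGet? onesA o).getD ""] else [])
      else parts
    PySem.Str.join " " parts

-- ===== PRECONDITION & SPEC =====
-- Pre_ excludes exactly n ≤ -11, where A's ones[n] raises IndexError (B raises there too).
def Pre_esperanto_number_word (n : Int) : Prop := -10 ≤ n
instance (n : Int) : Decidable (Pre_esperanto_number_word n) := by unfold Pre_esperanto_number_word; infer_instance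
def pvWitness_esperanto_number_word : Int := (123)

def Spec_esperanto_number_word (n : Int) (out : String) : Prop := out = esperanto_number_word_alt n
instance (n : Int) (out : String) : Decidable (Spec_esperanto_number_word n out) := by unfold Spec_esperanto_number_word; infer_instance

-- ===== CLAIM (what is proved, stated in full; the proofs are below) =====
def Claim_equal_esperanto_number_word : Prop := ∀ (n : Int), Dom_esperanto_number_word n → Pre_esperanto_number_word n → Spec_esperanto_number_word n (esperanto_number_word n)

-- ===== LEMMAS AND PROOFS =====

-- proof-side abbreviations
def gdig (k : Int) : String := (PySem.List.pyGet? onesA k).getD ""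
def tensParts (n : Int) : List String :=
  (if n / 10 = 1 then "dek" else gdig (n / 10) ++ "dek") ::
  (if n % 10 ≠ 0 then [gdig (n % 10)] else [])

lemma join_one (s : String) : PySem.Str.join " " [s] = s := by
  apply String.toList_inj.mp
  rw [PySem.Str.toList_join]
  simp [PySem.Chars.join_singleton]

lemma join_cons (s : String) (r : List String) (h : r ≠ []) :
    PySem.Str.join " " (s :: r) = s ++ (" " ++ PySem.Str.join " " r) := by
  obtain ⟨q, rest, rfl⟩ := List.exists_cons_of_ne_nil h
  apply String.toList_inj.mp
  rw [PySem.Str.toList_join, String.toList_append, String.toList_append, PySem.Str.toList_join]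
  simp [PySem.Chars.join_cons_cons]

lemma join_two (s t : String) : PySem.Str.join " " [s, t] = s ++ (" " ++ t) := by
  rw [join_cons s [t] (by simp), join_one]

lemma dek_space (s : String) : "dek" ++ (" " ++ s) = "dek " ++ s := by
  rw [← String.append_assoc, show ("dek" : String) ++ " " = "dek " from rfl]

-- A on 1..9 returns the ones word
lemma A_ones (n : Int) (h1 : 1 ≤ n) (h2 : n < 10) : esperanto_number_word n = gdig n := by
  rw [esperanto_number_word, if_neg (by omega : ¬ n = 0), if_pos (by omega : n < 10)]
  rfl

-- A on 10..99 returns the joined tens parts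
lemma A_tens (n : Int) (h1 : 10 ≤ n) (h2 : n < 100) :
    esperanto_number_word n = PySem.Str.join " " (tensParts n) := by
  rw [esperanto_number_word, if_neg (by omega : ¬ n = 0), if_neg (by omega : ¬ n < 10),
      if_pos (by omega : n < 100)]
  have hm : PySem.Int.mod n 10 = n % 10 := PySem.Int.mod_eq_emod_of_pos (by omega)
  have hf : PySem.Int.floordiv n 10 = n / 10 := PySem.Int.floordiv_eq_ediv_of_pos (by omega)
  simp only [hm, hf, tensParts, gdig]
  by_cases h20 : n < 20
  · have ht : n / 10 = 1 := by omega
    by_cases ho : n % 10 = 0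
    · simp [h20, ht, ho, join_one]
    · simp [h20, ht, ho, join_two]
  · have ht : ¬ n / 10 = 1 := by omega
    by_cases ho : n % 10 = 0
    · simp [h20, ht, ho, join_one]
    · simp only [if_neg h20, if_neg ho, if_pos (show n % 10 ≠ 0 from ho), if_neg ht]
      rw [join_two]
      simp only [String.append_assoc]
      rw [dek_space]

-- ===== VERDICT (by name: the statement is the Claim_ definition above) =====
theorem esperanto_number_word_spec : Claim_equal_esperanto_number_word := by
  intro n _ hpre
  unfold Spec_esperanto_number_word
  by_cases h0 : n = 0
  · subst h0
    rw [esperanto_number_word]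
    decide
  · by_cases h10 : n < 10
    · -- both take the identical ones-lookup branch
      rw [esperanto_number_word, esperanto_number_word_alt,
          if_neg h0, if_neg h0, if_pos h10, if_pos h10]
    · by_cases hbig : 1000 ≤ n
      · -- both return str(n)
        rw [esperanto_number_word, esperanto_number_word_alt, if_neg h0, if_neg h0,
            if_neg h10, if_neg h10, if_neg (by omega : ¬ n < 100),
            if_neg (by omega : ¬ n < 1000), if_pos (by omega : n ≥ 1000)]
      · -- 10 ≤ n < 1000: positional assembly
        have hge10 : 10 ≤ n := by omega
        have hlt : n < 1000 := by omega
        -- normalise B's PySem arithmetic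
        have hf100 : PySem.Int.floordiv n 100 = n / 100 := PySem.Int.floordiv_eq_ediv_of_pos (by omega)
        have hm100 : PySem.Int.mod n 100 = n % 100 := PySem.Int.mod_eq_emod_of_pos (by omega)
        have hfr : PySem.Int.floordiv (n % 100) 10 = (n % 100) / 10 := PySem.Int.floordiv_eq_ediv_of_pos (by omega)
        have hmr : PySem.Int.mod (n % 100) 10 = n % 10 := by
          rw [PySem.Int.mod_eq_emod_of_pos (by omega)]
          exact Int.emod_emod_of_dvd n (by norm_num)
        rw [esperanto_number_word_alt, if_neg h0, if_neg h10, if_neg (by omega : ¬ n ≥ 1000)]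
        simp only [hf100, hm100, hfr, hmr]
        by_cases h100 : n < 100
        · -- tens range: hundreds part empty
          have hh : n / 100 = 0 := by omega
          have hr : n % 100 = n := by omega
          have ht0 : ¬ n / 10 = 0 := by omega
          rw [A_tens n hge10 h100]
          simp only [hh, hr, ht0, tensParts, gdig]
          simp [h0]
        · -- hundreds range
          have hh1 : ¬ n / 100 = 0 := by omega
          rw [esperanto_number_word, if_neg h0, if_neg h10, if_neg h100, if_pos hlt]
          simp only [hf100, hm100, if_pos (show n / 100 ≠ 0 from hh1)]
          by_cases hrem : n % 100 = 0
          · simp [hrem, join_one]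
          · simp only [if_pos (show n % 100 ≠ 0 from hrem)]
            by_cases ht : (n % 100) / 10 = 0
            · -- remainder 1..9
              have : esperanto_number_word (n % 100) = gdig (n % 100) :=
                A_ones _ (by omega) (by omega)
              rw [this, if_pos ht, List.singleton_append, join_two]
              simp [gdig]
            · -- remainder 10..99
              have hA : esperanto_number_word (n % 100) = PySem.Str.join " " (tensParts (n % 100)) :=
                A_tens _ (by omega) (by omega)
              rw [hA, if_neg ht]
              have hmm : n % 100 % 10 = n % 10 := Int.emod_emod_of_dvd n (by norm_num)
              have hshape :
                  ([if n / 100 = 1 then "cent" else (PySem.List.pyGet? onesA (n / 100)).getD "" ++ "cent"] ++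
                    [if (n % 100) / 10 = 1 then "dek" else (PySem.List.pyGet? onesA ((n % 100) / 10)).getD "" ++ "dek"] ++
                    (if n % 10 ≠ 0 then [(PySem.List.pyGet? onesA (n % 10)).getD ""] else []))
                  = (if n / 100 = 1 then "cent" else (PySem.List.pyGet? onesA (n / 100)).getD "" ++ "cent") ::
                    tensParts (n % 100) := by
                simp [tensParts, gdig, hmm]
              rw [hshape, join_cons _ _ (by simp [tensParts])]
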